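-- pv_equiv track=rewrite | github.com/SongJungHyun1004/codetree-TILs | 231214/독서실의 거리두기 3/study-cafe-keeping-distance-3.py | find_two_minmaxdist
-- ===== SOURCE A (Python) =====
-- def find_two_minmaxdist(study_room, flag):
--     s = 0
--     max_dist = 0
--     min_dist = len(study_room)
--     for i in range(1, len(study_room)):
--         if study_room[i] == '1':
--             dist = i - s
--             if max_dist < dist:
--                 max_dist = dist
--                 mx_x, mx_y = s, i
--             if min_dist > dist:
--                 min_dist = dist
--                 mn_x, mn_y = s, i
--             s = i
--     if flag == 'max':
--         return mx_x, mx_y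
--     else:
--         return mn_x, mn_y
-- ===== SOURCE B (Python) =====
-- def find_two_minmaxdist(study_room, flag):
--     marks = [0] + [i for i in range(1, len(study_room)) if study_room[i] == '1']
--     pairs = list(zip(marks, marks[1:]))
--     if flag == 'max':
--         return max(pairs, key=lambda p: p[1] - p[0])
--     else:
--         return min(pairs, key=lambda p: p[1] - p[0])
-- ===== Notes on version B (the rewrite author's own statement) =====
-- stated objective: idiomatic
-- what changed: Replaces the single stateful scan carrying five loop variables with building the mark-position list once and selecting the extremal adjacent pair via max()/min() with a gap key (first-extremal tie-breaking matches A's strict-update rule).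
import Mathlib
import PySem

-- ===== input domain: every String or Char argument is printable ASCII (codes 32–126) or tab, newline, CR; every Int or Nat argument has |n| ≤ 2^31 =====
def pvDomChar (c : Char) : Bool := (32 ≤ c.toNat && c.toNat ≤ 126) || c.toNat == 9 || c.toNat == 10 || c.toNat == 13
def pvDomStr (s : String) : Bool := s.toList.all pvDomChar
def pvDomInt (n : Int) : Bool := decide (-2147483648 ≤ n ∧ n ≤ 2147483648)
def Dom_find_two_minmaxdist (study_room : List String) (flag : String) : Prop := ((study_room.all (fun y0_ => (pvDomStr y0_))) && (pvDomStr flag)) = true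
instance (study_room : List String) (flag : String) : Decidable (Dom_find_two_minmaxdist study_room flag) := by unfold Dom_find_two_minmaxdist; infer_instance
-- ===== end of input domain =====

-- B builds the mark-position list once and picks the extremal adjacent pair with a
-- first-extremal max/min (same values as A's stateful five-variable scan); objective: idiomatic.

-- ===== PORT A =====
def find_two_minmaxdist (study_room : List String) (flag : String) : Int × Int :=
  let n : Int := study_room.length
  let r := (PySem.List.pyRange 1 n 1).foldl
    (fun (acc : Int × Int × Int × Option (Int × Int) × Option (Int × Int)) i =>
      match acc with
      | (s, max_dist, min_dist, mx, mn) =>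
        if PySem.List.pyGetD study_room i "" = "1" then
          let dist := i - s
          (i,
           (if max_dist < dist then dist else max_dist),
           (if dist < min_dist then dist else min_dist),
           (if max_dist < dist then some (s, i) else mx),
           (if dist < min_dist then some (s, i) else mn))
        else acc)
    (0, 0, n, none, none)
  if flag = "max" then r.2.2.2.1.getD (0, 0) else r.2.2.2.2.getD (0, 0)

-- ===== PORT B =====
def find_two_minmaxdist_alt (study_room : List String) (flag : String) : Int × Int :=
  let marks : List Int :=
    0 :: (PySem.List.pyRange 1 (study_room.length : Int) 1).filter
          (fun i => decide (PySem.List.pyGetD study_room i "" = "1"))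
  let pairs := marks.zip marks.tail
  if flag = "max" then (PySem.List.max? pairs (fun p => p.2 - p.1)).getD (0, 0)
  else (PySem.List.min? pairs (fun p => p.2 - p.1)).getD (0, 0)

-- ===== PRECONDITION & SPEC =====
-- Pre_ excludes exactly the rooms with no '1' after index 0: there A raises UnboundLocalError
-- (and B raises ValueError from max()/min() on an empty sequence).
def Pre_find_two_minmaxdist (study_room : List String) (flag : String) : Prop :=
  "1" ∈ study_room.tail
instance (study_room : List String) (flag : String) : Decidable (Pre_find_two_minmaxdist study_room flag) := by unfold Pre_find_two_minmaxdist; infer_instance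

def pvWitness_find_two_minmaxdist : List String × String := (["0", "1", "0", "1"], "max")

def Spec_find_two_minmaxdist (study_room : List String) (flag : String) (out : Int × Int) : Prop := out = find_two_minmaxdist_alt study_room flag
instance (study_room : List String) (flag : String) (out : Int × Int) : Decidable (Spec_find_two_minmaxdist study_room flag out) := by unfold Spec_find_two_minmaxdist; infer_instance

-- ===== CLAIM (what is proved, stated in full; the proofs are below) =====
def Claim_equal_find_two_minmaxdist : Prop := ∀ (study_room : List String) (flag : String), Dom_find_two_minmaxdist study_room flag → Pre_find_two_minmaxdist study_room flag → Spec_find_two_minmaxdist study_room flag (find_two_minmaxdist study_room flag)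

-- ===== LEMMAS AND PROOFS =====

-- The core loop invariant: A's five-variable fold over the mark positions P computes, in its
-- two Option components, exactly the first-extremal folds of max?/min? over the adjacent pairs
-- of (s :: P), provided the running best distances (md / nd) agree with the keys of the
-- current Option accumulators (or are the initial 0 / n thresholds that every gap beats).
theorem pv_loop_inv (n : Int) (P : List Int)
    (s md nd : Int) (mxo mno : Option (Int × Int))
    (hpw : (s :: P).Pairwise (· < ·))
    (hub : ∀ i ∈ P, i < n) (hs : 0 ≤ s)
    (hmx : (mxo = none ∧ md = 0) ∨ ∃ m, mxo = some m ∧ md = m.2 - m.1)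
    (hmn : (mno = none ∧ nd = n) ∨ ∃ m, mno = some m ∧ nd = m.2 - m.1) :
    (P.foldl
      (fun (acc : Int × Int × Int × Option (Int × Int) × Option (Int × Int)) i =>
        match acc with
        | (s, max_dist, min_dist, mx, mn) =>
          (i,
           (if max_dist < i - s then i - s else max_dist),
           (if i - s < min_dist then i - s else min_dist),
           (if max_dist < i - s then some (s, i) else mx),
           (if i - s < min_dist then some (s, i) else mn)))
      (s, md, nd, mxo, mno)).2.2.2.1
      = List.foldl
          (fun (acc : Option (Int × Int)) x =>
            match acc with
            | none => some x
            | some m => if m.2 - m.1 < x.2 - x.1 then some x else some m)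
          mxo ((s :: P).zip P)
    ∧ (P.foldl
      (fun (acc : Int × Int × Int × Option (Int × Int) × Option (Int × Int)) i =>
        match acc with
        | (s, max_dist, min_dist, mx, mn) =>
          (i,
           (if max_dist < i - s then i - s else max_dist),
           (if i - s < min_dist then i - s else min_dist),
           (if max_dist < i - s then some (s, i) else mx),
           (if i - s < min_dist then some (s, i) else mn)))
      (s, md, nd, mxo, mno)).2.2.2.2
      = List.foldl
          (fun (acc : Option (Int × Int)) x =>
            match acc with
            | none => some x
            | some m => if x.2 - x.1 < m.2 - m.1 then some x else some m)
          mno ((s :: P).zip P) := by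
  induction P generalizing s md nd mxo mno with
  | nil => exact ⟨rfl, rfl⟩
  | cons p t ih =>
    rw [List.pairwise_cons] at hpw
    obtain ⟨hlt, hpw'⟩ := hpw
    have hsp : s < p := hlt p (List.mem_cons_self ..)
    have hpn : p < n := hub p (List.mem_cons_self ..)
    have hp0 : 0 ≤ p := le_of_lt (lt_of_le_of_lt hs hsp)
    simp only [List.foldl_cons, List.zip_cons_cons]
    have hmx' : ((if md < p - s then some (s, p) else mxo) = none ∧ (if md < p - s then p - s else md) = 0)
        ∨ ∃ m, (if md < p - s then some (s, p) else mxo) = some m ∧ (if md < p - s then p - s else md) = m.2 - m.1 := by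
      rcases hmx with ⟨h1, h2⟩ | ⟨m, h1, h2⟩
      · have h : md < p - s := by omega
        exact Or.inr ⟨(s, p), by rw [if_pos h], by rw [if_pos h]⟩
      · by_cases h : md < p - s
        · exact Or.inr ⟨(s, p), by rw [if_pos h], by rw [if_pos h]⟩
        · exact Or.inr ⟨m, by rw [if_neg h]; exact h1, by rw [if_neg h]; exact h2⟩
    have hmn' : ((if p - s < nd then some (s, p) else mno) = none ∧ (if p - s < nd then p - s else nd) = n)
        ∨ ∃ m, (if p - s < nd then some (s, p) else mno) = some m ∧ (if p - s < nd then p - s else nd) = m.2 - m.1 := by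
      rcases hmn with ⟨h1, h2⟩ | ⟨m, h1, h2⟩
      · have h : p - s < nd := by omega
        exact Or.inr ⟨(s, p), by rw [if_pos h], by rw [if_pos h]⟩
      · by_cases h : p - s < nd
        · exact Or.inr ⟨(s, p), by rw [if_pos h], by rw [if_pos h]⟩
        · exact Or.inr ⟨m, by rw [if_neg h]; exact h1, by rw [if_neg h]; exact h2⟩
    have step := ih p (if md < p - s then p - s else md) (if p - s < nd then p - s else nd)
      (if md < p - s then some (s, p) else mxo) (if p - s < nd then some (s, p) else mno)
      hpw' (fun i hi => hub i (List.mem_cons_of_mem _ hi)) hp0 hmx' hmn'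
    refine ⟨?_, ?_⟩
    · rw [step.1]
      congr 1
      rcases hmx with ⟨h1, h2⟩ | ⟨m, h1, h2⟩
      · have h : md < p - s := by omega
        rw [if_pos h, h1]
      · rw [h1]
        by_cases h : m.2 - m.1 < p - s
        · rw [if_pos (show md < p - s by omega)]
          simp [h]
        · rw [if_neg (show ¬ md < p - s by omega)]
          simp [h]
    · rw [step.2]
      congr 1
      rcases hmn with ⟨h1, h2⟩ | ⟨m, h1, h2⟩
      · have h : p - s < nd := by omega
        rw [if_pos h, h1]
      · rw [h1]
        by_cases h : p - s < m.2 - m.1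
        · rw [if_pos (show p - s < nd by omega)]
          simp [h]
        · rw [if_neg (show ¬ p - s < nd by omega)]
          simp [h]

-- ===== VERDICT (by name: the statement is the Claim_ definition above) =====
theorem find_two_minmaxdist_spec : Claim_equal_find_two_minmaxdist := by
  intro study_room flag _ _
  unfold Spec_find_two_minmaxdist
  simp only [find_two_minmaxdist, find_two_minmaxdist_alt, List.tail_cons]
  set n : Int := (study_room.length : Int) with hn
  set pred : Int → Bool := fun i => decide (PySem.List.pyGetD study_room i "" = "1") with hpred
  set P : List Int := (PySem.List.pyRange 1 n 1).filter pred with hP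
  have hmemP : ∀ i ∈ P, i ∈ PySem.List.pyRange 1 n 1 := fun i hi => List.mem_of_mem_filter hi
  have hpw : (0 :: P).Pairwise (· < ·) := by
    refine List.pairwise_cons.2 ⟨fun i hi => ?_, (PySem.List.pairwise_lt_pyRange_one 1 n).filter _⟩
    have := (PySem.List.mem_pyRange_one).1 (hmemP i hi)
    omega
  have hub : ∀ i ∈ P, i < n := fun i hi => ((PySem.List.mem_pyRange_one).1 (hmemP i hi)).2
  have key := pv_loop_inv n P 0 0 n none none hpw hub le_rfl (Or.inl ⟨rfl, rfl⟩) (Or.inl ⟨rfl, rfl⟩)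
  have hfold : (PySem.List.pyRange 1 n 1).foldl
      (fun (acc : Int × Int × Int × Option (Int × Int) × Option (Int × Int)) i =>
        match acc with
        | (s, max_dist, min_dist, mx, mn) =>
          if PySem.List.pyGetD study_room i "" = "1" then
            (i,
             (if max_dist < i - s then i - s else max_dist),
             (if i - s < min_dist then i - s else min_dist),
             (if max_dist < i - s then some (s, i) else mx),
             (if i - s < min_dist then some (s, i) else mn))
          else acc)
      (0, 0, n, none, none)
      = P.foldl
      (fun (acc : Int × Int × Int × Option (Int × Int) × Option (Int × Int)) i =>
        match acc with
        | (s, max_dist, min_dist, mx, mn) =>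
          (i,
           (if max_dist < i - s then i - s else max_dist),
           (if i - s < min_dist then i - s else min_dist),
           (if max_dist < i - s then some (s, i) else mx),
           (if i - s < min_dist then some (s, i) else mn)))
      (0, 0, n, none, none) := by
    rw [hP, List.foldl_filter]
    congr 1
    funext acc i
    obtain ⟨s, md, nd, mx, mn⟩ := acc
    by_cases h : PySem.List.pyGetD study_room i "" = "1" <;> simp [hpred, h]
  rw [hfold]
  by_cases hf : flag = "max"
  · rw [if_pos hf, if_pos hf, key.1, PySem.List.max?]
    congr 2
    funext acc x
    cases acc <;> rfl
  · rw [if_neg hf, if_neg hf, key.2, PySem.List.min?]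
    congr 2
    funext acc x
    cases acc <;> rfl
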